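-- pv_equiv track=rewrite | github.com/MoayadR/HackTrick24 | hacktrick_entrance_exam/problem 2.py | solution
-- ===== SOURCE A (Python) =====
-- def solution(blocks):
--     distr = [0 for _ in range(len(blocks))]
--     distl = [0 for _ in range(len(blocks))]
--     mxdist = 0
--     distl[0] = 1
--     distr[-1] = 1
--     for i in range(1, len(blocks)):
--         if(blocks[i] <= blocks[i-1]):
--             distl[i] = distl[i-1] + 1
--         else:
--             distl[i] = 1
--     for i in range(len(blocks)-2, -1, -1):
--         if(blocks[i] <= blocks[i+1]):
--             distr[i] = distr[i+1] + 1
--         else: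
--             distr[i] = 1
--     for i in range(len(blocks)):
--         mxdist = max(mxdist, distl[i]+distr[i]-1)
--     return mxdist
-- ===== SOURCE B (Python) =====
-- def solution(blocks):
--     prev = blocks[0]
--     ans = down = valley = 1
--     for x in blocks[1:]:
--         down = down + 1 if x <= prev else 1
--         valley = down if x < prev else valley + 1
--         if valley > ans:
--             ans = valley
--         prev = x
--     return ans
-- ===== Notes on version B (the rewrite author's own statement) =====
-- stated objective: alternative
-- what changed: Replaced A's two DP arrays filled in three passes (left non-increasing run lengths, right non-decreasing run lengths, then a max pass) by a single forward pass keeping only O(1) state: the current non-increasing run length, the current valley length ending here, and the running maximum.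
import Mathlib
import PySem

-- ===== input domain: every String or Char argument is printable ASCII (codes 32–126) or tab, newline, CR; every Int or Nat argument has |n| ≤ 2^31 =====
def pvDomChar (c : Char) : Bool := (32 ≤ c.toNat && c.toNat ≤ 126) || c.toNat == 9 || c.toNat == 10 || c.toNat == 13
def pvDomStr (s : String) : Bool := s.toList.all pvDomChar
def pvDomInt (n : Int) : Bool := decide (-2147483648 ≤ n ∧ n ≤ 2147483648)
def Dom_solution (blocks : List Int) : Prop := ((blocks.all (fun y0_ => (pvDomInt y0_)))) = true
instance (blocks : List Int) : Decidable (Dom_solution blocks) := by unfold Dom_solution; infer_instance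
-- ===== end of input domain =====

-- B replaces A's two DP arrays and three passes by one forward pass with O(1) state
-- (current non-increasing run length, current valley length, running maximum); same values, less memory.

-- ===== PORT A =====
def solution (blocks : List Int) : Int :=
  let distl0 : List Int := (PySem.List.pyRange 0 (PySem.List.len blocks) 1).map (fun _ => 0)
  let distr0 : List Int := (PySem.List.pyRange 0 (PySem.List.len blocks) 1).map (fun _ => 0)
  -- distl[0] = 1  (IndexError on the empty list: excluded by Pre_solution)
  let distl1 := PySem.List.pySetD distl0 0 1
  -- distr[-1] = 1  (Python negative index: the last element)
  let distr1 := PySem.List.pySetD distr0 (-1) 1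
  let distl := (PySem.List.pyRange 1 (PySem.List.len blocks) 1).foldl
    (fun dl i => PySem.List.pySetD dl i
      (if PySem.List.pyGetD blocks i 0 ≤ PySem.List.pyGetD blocks (i - 1) 0
       then PySem.List.pyGetD dl (i - 1) 0 + 1 else 1)) distl1
  let distr := (PySem.List.pyRange (PySem.List.len blocks - 2) (-1) (-1)).foldl
    (fun dr i => PySem.List.pySetD dr i
      (if PySem.List.pyGetD blocks i 0 ≤ PySem.List.pyGetD blocks (i + 1) 0
       then PySem.List.pyGetD dr (i + 1) 0 + 1 else 1)) distr1
  (PySem.List.pyRange 0 (PySem.List.len blocks) 1).foldl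
    (fun mx i => max mx (PySem.List.pyGetD distl i 0 + PySem.List.pyGetD distr i 0 - 1)) 0

-- ===== PORT B =====
def solution_alt (blocks : List Int) : Int :=
  -- prev = blocks[0]  (IndexError on the empty list: excluded by Pre_solution)
  let prev0 := PySem.List.pyGetD blocks 0 0
  let st := (PySem.List.slice blocks (some 1) none).foldl
    (fun (st : Int × Int × Int × Int) x =>
      let prev := st.1
      let down := st.2.1
      let valley := st.2.2.1
      let ans := st.2.2.2
      let down' := if x ≤ prev then down + 1 else 1
      let valley' := if x < prev then down' else valley + 1
      let ans' := if valley' > ans then valley' else ans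
      (x, down', valley', ans'))
    (prev0, 1, 1, 1)
  st.2.2.2

-- ===== PRECONDITION & SPEC =====
-- Pre_ excludes only the empty list, on which A raises IndexError on its first assignment.
def Pre_solution (blocks : List Int) : Prop := blocks ≠ []
instance (blocks : List Int) : Decidable (Pre_solution blocks) := by unfold Pre_solution; infer_instance
def pvWitness_solution : List Int := ([3, 1, 2] : List Int)

def Spec_solution (blocks : List Int) (out : Int) : Prop := out = solution_alt blocks
instance (blocks : List Int) (out : Int) : Decidable (Spec_solution blocks out) := by unfold Spec_solution; infer_instance

-- ===== CLAIM (what is proved, stated in full; the proofs are below) =====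
def Claim_equal_solution : Prop := ∀ (blocks : List Int), Dom_solution blocks → Pre_solution blocks → Spec_solution blocks (solution blocks)

-- ===== LEMMAS AND PROOFS =====

def pvDl (blocks : List Int) : Nat → Int
  | 0 => 1
  | i+1 => if blocks.getD (i+1) 0 ≤ blocks.getD i 0 then pvDl blocks i + 1 else 1

def pvDr (blocks : List Int) (i : Nat) : Int :=
  if _h : i + 1 < blocks.length then
    (if blocks.getD i 0 ≤ blocks.getD (i+1) 0 then pvDr blocks (i+1) + 1 else 1)
  else 1
termination_by blocks.length - i

def pvV (blocks : List Int) : Nat → Int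
  | 0 => 1
  | i+1 => if blocks.getD (i+1) 0 < blocks.getD i 0 then pvDl blocks (i+1) else pvV blocks i + 1

def pvM (blocks : List Int) : Nat → Int
  | 0 => 1
  | i+1 => if pvV blocks (i+1) > pvM blocks i then pvV blocks (i+1) else pvM blocks i

theorem pvDl_ge_one (blocks : List Int) (i : Nat) : 1 ≤ pvDl blocks i := by
  induction i with
  | zero => simp [pvDl]
  | succ i ih => simp only [pvDl]; split <;> omega

theorem pvDr_spec (blocks : List Int) (i : Nat) (hi : i < blocks.length) :
    ∃ k : Nat, pvDr blocks i = (k : Int) + 1 ∧ i + k < blocks.length ∧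
      ∀ j, i ≤ j → j < i + k → blocks.getD j 0 ≤ blocks.getD (j+1) 0 := by
  induction hd : blocks.length - i generalizing i with
  | zero => omega
  | succ d ih =>
    rw [pvDr]
    by_cases h1 : i + 1 < blocks.length
    · simp only [h1, dif_pos]
      by_cases h2 : blocks.getD i 0 ≤ blocks.getD (i+1) 0
      · obtain ⟨k, hk1, hk2, hk3⟩ := ih (i+1) (by omega) (by omega)
        refine ⟨k+1, by rw [if_pos h2, hk1]; push_cast; ring, by omega, ?_⟩
        intro j hj1 hj2
        rcases Nat.eq_or_lt_of_le hj1 with h | h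
        · subst h; exact h2
        · exact hk3 j h (by omega)
      · exact ⟨0, by rw [if_neg h2]; norm_num, by omega, by omega⟩
    · exact ⟨0, by rw [dif_neg h1]; norm_num, by omega, by omega⟩

theorem pvDr_ge_run (blocks : List Int) (i e : Nat) (hie : i ≤ e) (he : e < blocks.length)
    (run : ∀ j, i ≤ j → j < e → blocks.getD j 0 ≤ blocks.getD (j+1) 0) :
    ((e - i : Nat) : Int) + 1 ≤ pvDr blocks i := by
  induction hd : e - i generalizing i with
  | zero =>
    obtain ⟨k, hk1, -, -⟩ := pvDr_spec blocks i (by omega)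
    rw [hk1]; omega
  | succ d ih =>
    rw [pvDr, dif_pos (by omega)]
    rw [if_pos (run i le_rfl (by omega))]
    have := ih (i+1) (by omega) (fun j hj1 hj2 => run j (by omega) hj2) (by omega)
    omega

theorem pvV_ge_one (blocks : List Int) (i : Nat) : 1 ≤ pvV blocks i := by
  induction i with
  | zero => simp [pvV]
  | succ i ih =>
    simp only [pvV]; split
    · exact pvDl_ge_one blocks (i+1)
    · omega

theorem pvV_ge_dl (blocks : List Int) (i : Nat) : pvDl blocks i ≤ pvV blocks i := by
  induction i with
  | zero => simp [pvDl, pvV]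
  | succ i ih =>
    simp only [pvDl, pvV]
    split
    · split
      · exact le_rfl
      · omega
    · rename_i h
      split
      · omega
      · have := pvV_ge_one blocks i; omega

theorem pvV_run_ge (blocks : List Int) (i k : Nat)
    (run : ∀ j, i ≤ j → j < i + k → blocks.getD j 0 ≤ blocks.getD (j+1) 0) :
    pvDl blocks i + (k : Int) ≤ pvV blocks (i + k) := by
  induction k with
  | zero => simpa using pvV_ge_dl blocks i
  | succ k ih =>
    have hle := run (i+k) (by omega) (by omega)
    have hstep : pvV blocks (i + (k+1)) = pvV blocks (i+k) + 1 := by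
      have : i + (k+1) = (i+k) + 1 := by omega
      rw [this]
      simp only [pvV]
      rw [if_neg (by omega)]
    rw [hstep]
    have := ih (fun j h1 h2 => run j h1 (by omega))
    push_cast
    omega

theorem pvV_exists_run (blocks : List Int) (e : Nat) :
    ∃ i, i ≤ e ∧ pvV blocks e = pvDl blocks i + ((e - i : Nat) : Int) ∧
      ∀ j, i ≤ j → j < e → blocks.getD j 0 ≤ blocks.getD (j+1) 0 := by
  induction e with
  | zero => exact ⟨0, le_rfl, by simp [pvV, pvDl], by omega⟩
  | succ e ih =>
    by_cases h : blocks.getD (e+1) 0 < blocks.getD e 0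
    · refine ⟨e+1, le_rfl, ?_, by omega⟩
      simp only [pvV, if_pos h]
      simp
    · obtain ⟨i, hi1, hi2, hi3⟩ := ih
      refine ⟨i, by omega, ?_, ?_⟩
      · simp only [pvV, if_neg h]
        rw [hi2]
        have : (e + 1 - i : Nat) = (e - i) + 1 := by omega
        rw [this]; push_cast; ring
      · intro j hj1 hj2
        rcases Nat.lt_or_ge j e with hlt | hge
        · exact hi3 j hj1 hlt
        · have : j = e := by omega
          subst this; omega

theorem pvM_mono_le (blocks : List Int) (e i : Nat) (h : e ≤ i) :
    pvV blocks e ≤ pvM blocks i := by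
  induction i with
  | zero =>
    have : e = 0 := by omega
    subst this; simp [pvV, pvM]
  | succ i ih =>
    simp only [pvM]
    rcases Nat.eq_or_lt_of_le h with he | hlt
    · subst he; split <;> omega
    · have := ih (by omega); split <;> omega

theorem pvM_le (blocks : List Int) (i : Nat) (C : Int) (h1 : 1 ≤ C)
    (h : ∀ e, e ≤ i → pvV blocks e ≤ C) : pvM blocks i ≤ C := by
  induction i with
  | zero => simpa [pvM] using h1
  | succ i ih =>
    simp only [pvM]
    have h2 := h (i+1) le_rfl
    have := ih (fun e he => h e (by omega))
    split <;> omega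


def pvStep (st : Int × Int × Int × Int) (x : Int) : Int × Int × Int × Int :=
  let prev := st.1
  let down := st.2.1
  let valley := st.2.2.1
  let ans := st.2.2.2
  let down' := if x ≤ prev then down + 1 else 1
  let valley' := if x < prev then down' else valley + 1
  let ans' := if valley' > ans then valley' else ans
  (x, down', valley', ans')

theorem pvStep_eq (blocks : List Int) (k : Nat) :
    pvStep (blocks.getD k 0, pvDl blocks k, pvV blocks k, pvM blocks k) (blocks.getD (k+1) 0)
      = (blocks.getD (k+1) 0, pvDl blocks (k+1), pvV blocks (k+1), pvM blocks (k+1)) := by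
  simp only [pvStep]
  by_cases h : blocks.getD (k+1) 0 < blocks.getD k 0
  · simp only [if_pos h, if_pos (le_of_lt h)]
    have hdl : pvDl blocks (k+1) = pvDl blocks k + 1 := by
      simp only [pvDl]; rw [if_pos (le_of_lt h)]
    have hv : pvV blocks (k+1) = pvDl blocks (k+1) := by
      simp only [pvV]; rw [if_pos h]
    have hm : pvM blocks (k+1)
        = if pvV blocks (k+1) > pvM blocks k then pvV blocks (k+1) else pvM blocks k := by
      simp only [pvM]
    rw [hm, hv, hdl]
  · simp only [if_neg h]
    have hdl : pvDl blocks (k+1) = if blocks.getD (k+1) 0 ≤ blocks.getD k 0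
        then pvDl blocks k + 1 else 1 := by simp only [pvDl]
    have hv : pvV blocks (k+1) = pvV blocks k + 1 := by
      simp only [pvV]; rw [if_neg h]
    have hm : pvM blocks (k+1)
        = if pvV blocks (k+1) > pvM blocks k then pvV blocks (k+1) else pvM blocks k := by
      simp only [pvM]
    rw [hm, hv, hdl]

theorem pvB_loop (blocks : List Int) (k : Nat) (hk : k < blocks.length) :
    ((blocks.drop (k+1)).foldl pvStep
      (blocks.getD k 0, pvDl blocks k, pvV blocks k, pvM blocks k)).2.2.2
    = pvM blocks (blocks.length - 1) := by
  induction hd : blocks.length - (k+1) generalizing k with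
  | zero =>
    have hdrop : blocks.drop (k+1) = [] := by
      apply List.drop_eq_nil_of_le; omega
    rw [hdrop]
    have : k = blocks.length - 1 := by omega
    rw [this, List.foldl_nil]
  | succ d ih =>
    have hk1 : k + 1 < blocks.length := by omega
    have hdrop : blocks.drop (k+1) = blocks[k+1] :: blocks.drop (k+2) := by
      rw [List.drop_eq_getElem_cons hk1]
    have hget : blocks[k+1] = blocks.getD (k+1) 0 := by
      rw [List.getD_eq_getElem blocks 0 hk1]
    rw [hdrop, List.foldl_cons, hget, pvStep_eq]
    exact ih (k+1) hk1 (by omega)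

theorem solution_alt_eq (blocks : List Int) (hn : blocks ≠ []) :
    solution_alt blocks = pvM blocks (blocks.length - 1) := by
  have h0 : 0 < blocks.length := List.length_pos_of_ne_nil hn
  show ((PySem.List.slice blocks (some 1) none).foldl pvStep
      (PySem.List.pyGetD blocks 0 0, 1, 1, 1)).2.2.2 = _
  rw [PySem.List.slice_from_one]
  have ht : blocks.tail = blocks.drop 1 := by simp
  have hp : PySem.List.pyGetD blocks 0 0 = blocks.getD 0 0 := by
    simpa using PySem.List.pyGetD_natCast (n := 0) (xs := blocks) (d := 0)
  rw [ht, hp]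
  have h := pvB_loop blocks 0 h0
  simpa [pvDl, pvV, pvM] using h

def pvStepL (blocks : List Int) (dl : List Int) (i : Int) : List Int :=
  PySem.List.pySetD dl i
    (if PySem.List.pyGetD blocks i 0 ≤ PySem.List.pyGetD blocks (i - 1) 0
     then PySem.List.pyGetD dl (i - 1) 0 + 1 else 1)

def pvStepR (blocks : List Int) (dr : List Int) (i : Int) : List Int :=
  PySem.List.pySetD dr i
    (if PySem.List.pyGetD blocks i 0 ≤ PySem.List.pyGetD blocks (i + 1) 0
     then PySem.List.pyGetD dr (i + 1) 0 + 1 else 1)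

theorem pvGetD_set (L : List Int) (m j : Nat) (v : Int) (hj : j < L.length) :
    (L.set m v).getD j 0 = if m = j then v else L.getD j 0 := by
  by_cases h : m = j
  · subst h
    rw [if_pos rfl, List.getD_eq_getElem _ _ (by simpa using hj), List.getElem_set]
    simp
  · rw [if_neg h, List.getD_eq_getElem _ _ (by simpa using hj),
        List.getD_eq_getElem _ _ hj, List.getElem_set]
    simp [h]

theorem pySetD_neg_one (xs : List Int) (h : xs ≠ []) :
    PySem.List.pySetD xs (-1) 1 = xs.set (xs.length - 1) 1 := by
  have hl : 1 ≤ xs.length := List.length_pos_of_ne_nil h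
  simp [PySem.List.pySetD, PySem.List.pySet?, PySem.List.pyIdx?, hl]

theorem pvA_distl_loop (blocks : List Int) (m : Nat) (hm1 : 1 ≤ m) (hm2 : m ≤ blocks.length)
    (L : List Int) (hL : L.length = blocks.length)
    (hinv : ∀ j, j < m → L.getD j 0 = pvDl blocks j) :
    ((PySem.List.pyRange (m : Int) (PySem.List.len blocks) 1).foldl (pvStepL blocks) L).length
        = blocks.length ∧
      ∀ j, j < blocks.length →
        ((PySem.List.pyRange (m : Int) (PySem.List.len blocks) 1).foldl
          (pvStepL blocks) L).getD j 0 = pvDl blocks j := by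
  induction hd : blocks.length - m generalizing m L with
  | zero =>
    rw [PySem.List.pyRange_one_eq_nil (by simp; omega : (PySem.List.len blocks) ≤ (m:Int))]
    exact ⟨hL, fun j hj => hinv j (by omega)⟩
  | succ d ih =>
    have hm : m < blocks.length := by omega
    rw [PySem.List.pyRange_one_cons (by simp; omega : (m:Int) < PySem.List.len blocks)]
    rw [List.foldl_cons]
    have hcast : (m : Int) + 1 = ((m+1 : Nat) : Int) := by push_cast; ring
    have hstep : pvStepL blocks L (m : Int) = L.set m (pvDl blocks m) := by
      obtain ⟨m', rfl⟩ : ∃ m', m = m' + 1 := ⟨m - 1, by omega⟩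
      simp only [pvStepL]
      have h1 : ((m' + 1 : Nat) : Int) - 1 = ((m' : Nat) : Int) := by push_cast; ring
      rw [h1]
      simp only [PySem.List.pyGetD_natCast, PySem.List.pySetD_natCast]
      rw [hinv m' (by omega)]
      simp only [pvDl]
    rw [hcast, hstep]
    refine ih (m+1) (by omega) (by omega) _ (by simp [hL]) ?_ (by omega)
    intro j hj
    rw [pvGetD_set _ _ _ _ (by omega)]
    by_cases h : m = j
    · subst h; simp
    · rw [if_neg h]; exact hinv j (by omega)

theorem pvA_distr_loop (blocks : List Int) (hn : 0 < blocks.length)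
    (k : Nat) (hk : k ≤ blocks.length - 1)
    (L : List Int) (hL : L.length = blocks.length)
    (hinv : ∀ j, k ≤ j → j < blocks.length → L.getD j 0 = pvDr blocks j) :
    ((PySem.List.pyRange ((k : Int) - 1) (-1) (-1)).foldl (pvStepR blocks) L).length
        = blocks.length ∧
      ∀ j, j < blocks.length →
        ((PySem.List.pyRange ((k : Int) - 1) (-1) (-1)).foldl
          (pvStepR blocks) L).getD j 0 = pvDr blocks j := by
  induction k generalizing L with
  | zero =>
    rw [PySem.List.pyRange_neg_one_eq_nil (by norm_num)]
    exact ⟨hL, fun j hj => hinv j (by omega) hj⟩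
  | succ k ih =>
    have hin : k + 1 < blocks.length := by omega
    have h1 : ((k + 1 : Nat) : Int) - 1 = (k : Int) := by push_cast; ring
    rw [h1, PySem.List.pyRange_neg_one_cons (by omega : (-1:Int) < (k:Int))]
    rw [List.foldl_cons]
    have hstep : pvStepR blocks L (k : Int) = L.set k (pvDr blocks k) := by
      simp only [pvStepR]
      have h2 : (k : Int) + 1 = ((k+1 : Nat) : Int) := by push_cast; ring
      rw [h2]
      simp only [PySem.List.pyGetD_natCast, PySem.List.pySetD_natCast]
      rw [hinv (k+1) (by omega) hin]
      have hval : pvDr blocks k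
          = if blocks.getD k 0 ≤ blocks.getD (k+1) 0 then pvDr blocks (k+1) + 1 else 1 := by
        conv_lhs => rw [pvDr]
        rw [dif_pos hin]
      rw [hval]
    rw [hstep]
    refine ih (by omega) _ (by simp [hL]) ?_
    intro j hj1 hj2
    rw [pvGetD_set _ _ _ _ (by omega)]
    by_cases h : k = j
    · subst h; simp
    · rw [if_neg h]; exact hinv j (by omega) hj2

theorem solution_eq (blocks : List Int) (hn : blocks ≠ []) :
    solution blocks =
      ((List.range blocks.length).map
        (fun i => pvDl blocks i + pvDr blocks i - 1)).foldl max 0 := by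
  have h0 : 0 < blocks.length := List.length_pos_of_ne_nil hn
  have hlen : PySem.List.len blocks = (blocks.length : Int) := by simp
  have hrep : ((PySem.List.pyRange 0 (PySem.List.len blocks) 1).map (fun _ => (0:Int)))
      = List.replicate blocks.length 0 := by
    rw [List.map_const', PySem.List.length_pyRange_one, hlen]
    simp
  have hrepl : (List.replicate blocks.length (0:Int)).length = blocks.length := by simp
  -- initial distl
  have hdistl1 : PySem.List.pySetD (List.replicate blocks.length (0:Int)) 0 1
      = (List.replicate blocks.length (0:Int)).set 0 1 := by
    rw [PySem.List.pySetD_of_nonneg _ _ (by norm_num : (0:Int) ≤ 0)]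
    norm_num
  -- initial distr
  have hdistr1 : PySem.List.pySetD (List.replicate blocks.length (0:Int)) (-1) 1
      = (List.replicate blocks.length (0:Int)).set (blocks.length - 1) 1 := by
    rw [pySetD_neg_one _ (by simp; omega), hrepl]
  obtain ⟨hLl, hGl⟩ := pvA_distl_loop blocks 1 le_rfl h0
    ((List.replicate blocks.length (0:Int)).set 0 1) (by simp)
    (by
      intro j hj
      have : j = 0 := by omega
      subst this
      rw [pvGetD_set _ _ _ _ (by simpa using h0), if_pos rfl]
      simp [pvDl])
  obtain ⟨hLr, hGr⟩ := pvA_distr_loop blocks h0 (blocks.length - 1) le_rfl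
    ((List.replicate blocks.length (0:Int)).set (blocks.length - 1) 1) (by simp)
    (by
      intro j hj1 hj2
      have : j = blocks.length - 1 := by omega
      subst this
      rw [pvGetD_set _ _ _ _ (by simpa using hj2), if_pos rfl]
      rw [pvDr, dif_neg (by omega)])
  have hc2 : (PySem.List.len blocks - 2 : Int) = ((blocks.length - 1 : Nat) : Int) - 1 := by
    rw [hlen]; omega
  rw [← hc2] at hGr
  simp only [Nat.cast_one, hlen] at hGl hGr
  show (PySem.List.pyRange 0 (PySem.List.len blocks) 1).foldl
    (fun mx i => max mx (PySem.List.pyGetD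
        ((PySem.List.pyRange 1 (PySem.List.len blocks) 1).foldl (pvStepL blocks)
          (PySem.List.pySetD ((PySem.List.pyRange 0 (PySem.List.len blocks) 1).map (fun _ => 0)) 0 1)) i 0
      + PySem.List.pyGetD
        ((PySem.List.pyRange (PySem.List.len blocks - 2) (-1) (-1)).foldl (pvStepR blocks)
          (PySem.List.pySetD ((PySem.List.pyRange 0 (PySem.List.len blocks) 1).map (fun _ => 0)) (-1) 1)) i 0 - 1)) 0
    = _
  rw [hrep, hdistl1, hdistr1]
  simp only [hlen]
  rw [PySem.List.pyRange_zero_natCast, List.foldl_map, List.foldl_map]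
  apply PySem.List.foldl_congr_mem
  intro acc x hx
  have hxn : x < blocks.length := List.mem_range.mp hx
  rw [PySem.List.pyGetD_natCast, PySem.List.pyGetD_natCast, hGl x hxn, hGr x hxn]

theorem pv_final (blocks : List Int) (hn : blocks ≠ []) :
    ((List.range blocks.length).map
        (fun i => pvDl blocks i + pvDr blocks i - 1)).foldl max 0
      = pvM blocks (blocks.length - 1) := by
  have h0 : 0 < blocks.length := List.length_pos_of_ne_nil hn
  apply le_antisymm
  · rcases PySem.List.foldl_max_mem
        ((List.range blocks.length).map (fun i => pvDl blocks i + pvDr blocks i - 1)) 0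
      with h | h
    · rw [h]
      have hm := pvM_mono_le blocks 0 (blocks.length - 1) (by omega)
      have hv : pvV blocks 0 = 1 := rfl
      omega
    · obtain ⟨i, hi, hgi⟩ := List.mem_map.mp h
      have hin : i < blocks.length := List.mem_range.mp hi
      obtain ⟨k, hk1, hk2, hk3⟩ := pvDr_spec blocks i hin
      have hrun := pvV_run_ge blocks i k hk3
      have hm := pvM_mono_le blocks (i + k) (blocks.length - 1) (by omega)
      rw [← hgi, hk1]
      omega
  · apply pvM_le
    · have hmem : pvDl blocks 0 + pvDr blocks 0 - 1 ∈
          (List.range blocks.length).map (fun i => pvDl blocks i + pvDr blocks i - 1) :=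
        List.mem_map_of_mem (List.mem_range.mpr h0)
      have hF := (PySem.List.le_foldl_max
        ((List.range blocks.length).map (fun i => pvDl blocks i + pvDr blocks i - 1)) 0).2
        _ hmem
      obtain ⟨k, hk1, -, -⟩ := pvDr_spec blocks 0 h0
      have hdl := pvDl_ge_one blocks 0
      rw [hk1] at hF
      omega
    · intro e he
      obtain ⟨i, hie, hVe, hrun⟩ := pvV_exists_run blocks e
      have hdr := pvDr_ge_run blocks i e hie (by omega) hrun
      have hmem : pvDl blocks i + pvDr blocks i - 1 ∈
          (List.range blocks.length).map (fun j => pvDl blocks j + pvDr blocks j - 1) :=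
        List.mem_map_of_mem (List.mem_range.mpr (by omega))
      have hF := (PySem.List.le_foldl_max
        ((List.range blocks.length).map (fun j => pvDl blocks j + pvDr blocks j - 1)) 0).2
        _ hmem
      omega


-- ===== VERDICT (by name: the statement is the Claim_ definition above) =====
theorem solution_spec : Claim_equal_solution := by
  intro blocks _ hpre
  unfold Spec_solution
  rw [solution_eq blocks hpre, solution_alt_eq blocks hpre, pv_final blocks hpre]
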